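-- pv_equiv track=rewrite | github.com/NichoJen/MultiNER | utils.py | get_real_word_indices
-- ===== SOURCE A (Python) =====
-- def get_real_word_indices(word_ids):
--     """
--     get the starting indices of each word in list of subwords
--     """
--     indices = []
--     prev_word_idx = None
--     for i, word_idx in enumerate(word_ids):
--         if word_idx is not None and word_idx != prev_word_idx:
--             indices.append(i)
--             prev_word_idx = word_idx
--     return indices
-- ===== SOURCE B (Python) =====
-- def get_real_word_indices(word_ids):
--     filtered = [(i, w) for i, w in enumerate(word_ids) if w is not None]
--     if not filtered:
--         return []
--     (i0, _), rest = filtered[0], filtered[1:]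
--     return [i0] + [i for (i, w), (_, pw) in zip(rest, filtered) if w != pw]
-- ===== Notes on version B (the rewrite author's own statement) =====
-- stated objective: alternative
-- what changed: Replaces the single stateful loop carrying a prev_word_idx accumulator by a filter-then-pairwise decomposition: first drop None entries keeping original indices, then compare each filtered entry with its immediate predecessor via zip and collect change points.
import Mathlib
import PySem

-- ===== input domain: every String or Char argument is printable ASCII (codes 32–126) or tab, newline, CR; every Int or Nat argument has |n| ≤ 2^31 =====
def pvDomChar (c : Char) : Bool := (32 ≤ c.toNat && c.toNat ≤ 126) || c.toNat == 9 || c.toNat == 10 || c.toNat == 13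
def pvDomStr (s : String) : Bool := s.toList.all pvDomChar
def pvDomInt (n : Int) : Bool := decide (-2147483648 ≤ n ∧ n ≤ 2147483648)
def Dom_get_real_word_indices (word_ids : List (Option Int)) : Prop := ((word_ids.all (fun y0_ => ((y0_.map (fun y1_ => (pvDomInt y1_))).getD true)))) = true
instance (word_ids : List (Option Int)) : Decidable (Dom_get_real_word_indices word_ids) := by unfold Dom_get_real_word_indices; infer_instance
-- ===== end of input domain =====

-- B replaces A's stateful prev-tracking loop by a filter-then-pairwise-compare decomposition (alternative, same cost).

-- ===== PORT A =====
-- literal transliteration of A: one pass over enumerate(word_ids) carrying (indices, prev_word_idx)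
def get_real_word_indices (word_ids : List (Option Int)) : List Int :=
  ((PySem.List.enumerate word_ids 0).foldl
    (fun (st : List Int × Option Int) (p : Int × Option Int) =>
      if p.2 ≠ none ∧ p.2 ≠ st.2 then (st.1 ++ [p.1], p.2) else st)
    ([], none)).1

-- ===== PORT B =====
-- literal transliteration of B: filter out Nones (keeping indices), then zip with predecessor and collect change points
def get_real_word_indices_alt (word_ids : List (Option Int)) : List Int :=
  let filtered := (PySem.List.enumerate word_ids 0).filterMap
      (fun p => match p.2 with | some w => some (p.1, w) | none => none)
  match filtered with
  | [] => []
  | (i0, _) :: rest =>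
    i0 :: (rest.zip filtered).filterMap
      (fun q => if q.1.2 ≠ q.2.2 then some q.1.1 else none)

-- ===== PRECONDITION & SPEC =====
def Spec_get_real_word_indices (word_ids : List (Option Int)) (out : List Int) : Prop := out = get_real_word_indices_alt word_ids
instance (word_ids : List (Option Int)) (out : List Int) : Decidable (Spec_get_real_word_indices word_ids out) := by unfold Spec_get_real_word_indices; infer_instance

-- ===== CLAIM (what is proved, stated in full; the proofs are below) =====
def Claim_equal_get_real_word_indices : Prop := ∀ (word_ids : List (Option Int)), Dom_get_real_word_indices word_ids → Spec_get_real_word_indices word_ids (get_real_word_indices word_ids)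

-- ===== LEMMAS AND PROOFS =====

-- A's loop, written as a recursion producing the collected indices directly
def goA (prev : Option Int) : List (Int × Option Int) → List Int
  | [] => []
  | p :: t => if p.2 ≠ none ∧ p.2 ≠ prev then p.1 :: goA p.2 t else goA prev t

-- change-point recursion over the None-free list, always updating the predecessor
def chainB (prev : Option Int) : List (Int × Int) → List Int
  | [] => []
  | q :: t => if some q.2 ≠ prev then q.1 :: chainB (some q.2) t else chainB (some q.2) t

theorem foldlA_eq_goA (l : List (Int × Option Int)) : ∀ (acc : List Int) (prev : Option Int),
    (l.foldl (fun (st : List Int × Option Int) (p : Int × Option Int) =>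
      if p.2 ≠ none ∧ p.2 ≠ st.2 then (st.1 ++ [p.1], p.2) else st) (acc, prev)).1
    = acc ++ goA prev l := by
  induction l with
  | nil => intro acc prev; simp [goA]
  | cons p t ih =>
      intro acc prev
      simp only [List.foldl_cons, goA]
      by_cases h : p.2 ≠ none ∧ p.2 ≠ prev
      · simp [h, ih]
      · simp [h, ih]

theorem goA_eq_chainB (l : List (Int × Option Int)) : ∀ (prev : Option Int),
    goA prev l = chainB prev (l.filterMap (fun p => match p.2 with | some w => some (p.1, w) | none => none)) := by
  induction l with
  | nil => intro prev; simp [goA, chainB]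
  | cons p t ih =>
      intro prev
      match hp : p.2 with
      | none => simpa [goA, List.filterMap_cons, hp] using ih prev
      | some w =>
          by_cases h : some w = prev
          · subst h
            simp [goA, hp, chainB, ih]
          · simp [goA, hp, chainB, h, ih]

theorem zip_eq_chainB (rest : List (Int × Int)) : ∀ (p : Int × Int),
    ((rest.zip (p :: rest)).filterMap (fun q => if q.1.2 ≠ q.2.2 then some q.1.1 else none))
    = chainB (some p.2) rest := by
  induction rest with
  | nil => intro p; simp [chainB]
  | cons q r ih =>
      intro p
      simp only [List.zip_cons_cons, List.filterMap_cons]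
      rw [ih q]
      by_cases h : q.2 = p.2
      · simp [chainB, h]
      · simp [chainB, h]

-- ===== VERDICT (by name: the statement is the Claim_ definition above) =====
theorem get_real_word_indices_spec : Claim_equal_get_real_word_indices := by
  intro word_ids _
  unfold Spec_get_real_word_indices get_real_word_indices get_real_word_indices_alt
  rw [foldlA_eq_goA, goA_eq_chainB]
  cases hf : (PySem.List.enumerate word_ids 0).filterMap
      (fun p => match p.2 with | some w => some (p.1, w) | none => none) with
  | nil => simp [chainB]
  | cons p rest =>
      obtain ⟨i0, w0⟩ := p
      simp only []
      rw [zip_eq_chainB]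
      simp [chainB]
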